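-- pv_equiv track=rewrite | github.com/AshishNEC/ML | Lab2/Ex10-11.py | check_reverse
-- ===== SOURCE A (Python) =====
-- def check_reverse(original_list):
--     temp_list = original_list[:]
--     reverse_list = []
--
--     for index in range(len(temp_list)):
--         sub_index = index
--         while sub_index < len(temp_list)-1:
--             # if len(temp_list[index]) != len(temp_list[sub_index+1]):
--             #    sub_index += 1
--             #    continue
--             if temp_list[index] == temp_list[sub_index+1][::-1]:
--                 reverse_list.append(temp_list[index])
--             sub_index += 1
--     return reverse_list
-- ===== SOURCE B (Python) =====
-- def check_reverse(original_list):
--     counts = {}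
--     chunks = []
--     for s in reversed(original_list):
--         chunks.append([s] * counts.get(s[::-1], 0))
--         counts[s] = counts.get(s, 0) + 1
--     out = []
--     for chunk in reversed(chunks):
--         out.extend(chunk)
--     return out
-- ===== Notes on version B (the rewrite author's own statement) =====
-- stated objective: faster
-- what changed: replaces A's nested index scan (each element compared with every later element) by one right-to-left pass that keeps a hash counter of suffix occurrences and reads each element's number of reversed matches from it
import Mathlib
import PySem

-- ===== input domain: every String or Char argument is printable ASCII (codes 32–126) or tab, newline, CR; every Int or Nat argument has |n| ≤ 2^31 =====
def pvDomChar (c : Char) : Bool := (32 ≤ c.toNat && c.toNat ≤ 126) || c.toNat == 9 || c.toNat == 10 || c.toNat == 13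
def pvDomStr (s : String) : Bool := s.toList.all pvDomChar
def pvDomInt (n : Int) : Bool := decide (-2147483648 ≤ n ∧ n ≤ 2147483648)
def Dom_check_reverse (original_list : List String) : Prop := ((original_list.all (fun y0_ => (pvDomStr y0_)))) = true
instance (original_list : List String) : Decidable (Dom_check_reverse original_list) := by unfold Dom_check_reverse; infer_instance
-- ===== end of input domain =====

-- B replaces A's nested scan by a single right-to-left pass with a hash counter of suffix occurrences (same return value).

-- s[::-1]
def pvRev (s : String) : String := (PySem.Str.slice? s none none (-1)).getD ""

-- ===== PORT A =====
def check_reverse (original_list : List String) : List String :=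
  let temp_list := original_list
  (PySem.List.pyRange 0 (temp_list.length : Int) 1).foldl (fun reverse_list index =>
    -- 'while sub_index < len(temp_list)-1' with sub_index starting at index, incremented each pass
    (PySem.List.pyRange index ((temp_list.length : Int) - 1) 1).foldl (fun rl sub_index =>
      if PySem.List.pyGetD temp_list index "" =
         pvRev (PySem.List.pyGetD temp_list (sub_index + 1) "")
      then rl ++ [PySem.List.pyGetD temp_list index ""] else rl) reverse_list) []

-- ===== PORT B =====
def check_reverse_alt (original_list : List String) : List String :=
  let st := original_list.reverse.foldl
    (fun (st : PySem.Dict String Int × List (List String)) s =>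
      (st.1.insert s (st.1.getD s 0 + 1),
       st.2 ++ [PySem.List.pyRepeat [s] (st.1.getD (pvRev s) 0)]))
    (PySem.Dict.empty, [])
  st.2.reverse.foldl (fun out chunk => out ++ chunk) []

-- ===== PRECONDITION & SPEC =====
def Spec_check_reverse (original_list : List String) (out : List String) : Prop := out = check_reverse_alt original_list
instance (original_list : List String) (out : List String) : Decidable (Spec_check_reverse original_list out) := by unfold Spec_check_reverse; infer_instance

-- ===== CLAIM (what is proved, stated in full; the proofs are below) =====
def Claim_equal_check_reverse : Prop := ∀ (original_list : List String), Dom_check_reverse original_list → Spec_check_reverse original_list (check_reverse original_list)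

-- ===== LEMMAS AND PROOFS =====

-- common shape of both results: each element, then one copy of it per later element equal to its reverse
def pvSpec : List String → List String
  | [] => []
  | x :: t => List.replicate (t.count (pvRev x)) x ++ pvSpec t

theorem pvRev_involutive (s : String) : pvRev (pvRev s) = s := by
  simp [pvRev, PySem.Str.slice?_none_none_neg_one]

-- A's inner while-loop contributes exactly the count of later reversed matches
theorem chunk_eq (l : List String) (i : Int) (hi : 0 ≤ i) :
    List.map (fun (_ : Int) => PySem.List.pyGetD l i "")
      (List.filter (fun s => decide (PySem.List.pyGetD l i "" = pvRev (PySem.List.pyGetD l (s + 1) "")))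
        (PySem.List.pyRange i ((l.length : Int) - 1) 1)) =
    List.replicate ((l.drop (i + 1).toNat).count (pvRev (PySem.List.pyGetD l i "")))
      (PySem.List.pyGetD l i "") := by
  set y := PySem.List.pyGetD l i "" with hy
  rw [List.map_const']
  congr 1
  rw [← List.countP_eq_length_filter]
  have hdrop : l.drop (i + 1).toNat =
      (PySem.List.pyRange (i + 1) (PySem.List.len l) 1).map (fun j => PySem.List.pyGetD l j "") :=
    (PySem.List.map_pyGetD_pyRange l "" (by omega)).symm
  rw [List.count_eq_countP, hdrop, List.countP_map]
  rw [PySem.List.pyRange_one i ((l.length : Int) - 1), PySem.List.pyRange_one (i + 1)]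
  rw [List.countP_map, List.countP_map]
  have hlen : ((l.length : Int) - 1 - i).toNat = ((PySem.List.len l) - (i + 1)).toNat := by
    simp [PySem.List.len]; omega
  rw [hlen]
  apply List.countP_congr
  intro k _
  simp only [Function.comp_apply]
  have harg : i + (k : Int) + 1 = i + 1 + (k : Int) := by ring
  rw [harg]
  rcases eq_or_ne y (pvRev (PySem.List.pyGetD l (i + 1 + (k : Int)) "")) with h | h
  · rw [h, pvRev_involutive]; simp
  · have h2 : PySem.List.pyGetD l (i + 1 + (k : Int)) "" ≠ pvRev y := by
      intro hc; exact h (by rw [hc, pvRev_involutive])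
    simp [h, h2]

theorem flat_eq (l : List String) :
    (List.range l.length).flatMap
      (fun k => List.replicate ((l.drop (k + 1)).count (pvRev (l.getD k ""))) (l.getD k "")) =
    pvSpec l := by
  induction l with
  | nil => rfl
  | cons x t ih =>
    rw [List.length_cons, List.range_succ_eq_map, List.flatMap_cons, List.flatMap_map]
    rw [pvSpec]
    have h0 : (x :: t).drop (0 + 1) = t := by simp
    have hg : List.getD (x :: t) 0 "" = x := rfl
    rw [h0, hg]
    congr 1

theorem a_eq_spec (l : List String) : check_reverse l = pvSpec l := by
  show (PySem.List.pyRange 0 (l.length : Int) 1).foldl _ [] = pvSpec l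
  have inner : ∀ (acc : List String) (i : Int),
      (PySem.List.pyRange i ((l.length : Int) - 1) 1).foldl (fun rl s =>
        if PySem.List.pyGetD l i "" = pvRev (PySem.List.pyGetD l (s + 1) "")
        then rl ++ [PySem.List.pyGetD l i ""] else rl) acc =
      acc ++ List.map (fun (_ : Int) => PySem.List.pyGetD l i "")
        (List.filter (fun s => decide (PySem.List.pyGetD l i "" = pvRev (PySem.List.pyGetD l (s + 1) "")))
          (PySem.List.pyRange i ((l.length : Int) - 1) 1)) := by
    intro acc i
    simpa using PySem.List.foldl_append_if
      (fun s => decide (PySem.List.pyGetD l i "" = pvRev (PySem.List.pyGetD l (s + 1) "")))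
      (fun _ => PySem.List.pyGetD l i "")
      (PySem.List.pyRange i ((l.length : Int) - 1) 1) acc
  simp only [inner]
  rw [PySem.List.foldl_append_eq_flatMap, List.nil_append]
  have hc : ∀ i ∈ PySem.List.pyRange 0 (l.length : Int) 1,
      (List.map (fun (_ : Int) => PySem.List.pyGetD l i "")
        (List.filter (fun s => decide (PySem.List.pyGetD l i "" = pvRev (PySem.List.pyGetD l (s + 1) "")))
          (PySem.List.pyRange i ((l.length : Int) - 1) 1))) =
      List.replicate ((l.drop (i + 1).toNat).count (pvRev (PySem.List.pyGetD l i "")))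
        (PySem.List.pyGetD l i "") := by
    intro i hi
    exact chunk_eq l i (by rcases (PySem.List.mem_pyRange_one).1 hi with ⟨h1, _⟩; omega)
  rw [List.flatMap_congr hc]
  rw [PySem.List.pyRange_one 0 (l.length : Int), List.flatMap_map]
  rw [show ((l.length : Int) - 0).toNat = l.length by omega]
  rw [← flat_eq l]
  apply List.flatMap_congr
  intro k _
  have h1 : (0 : Int) + (k : Int) = ((k : Nat) : Int) := by ring
  rw [h1, PySem.List.pyGetD_natCast]
  rw [show (((k : Nat) : Int) + 1).toNat = k + 1 by omega]

-- B's loop body, named for the proofs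
def pvStep (st : PySem.Dict String Int × List (List String)) (s : String) :
    PySem.Dict String Int × List (List String) :=
  (st.1.insert s (st.1.getD s 0 + 1),
   st.2 ++ [PySem.List.pyRepeat [s] (st.1.getD (pvRev s) 0)])

theorem pvStep_fst (l : List String) (d : PySem.Dict String Int) (c : List (List String)) :
    (l.foldl pvStep (d, c)).1 = l.foldl (fun d x => d.insert x (d.getD x 0 + 1)) d := by
  induction l generalizing d c with
  | nil => rfl
  | cons x t ih => simpa [pvStep] using ih _ _

theorem pvB2_cons (x : String) (t : List String) :
    ((x :: t).reverse.foldl pvStep (PySem.Dict.empty, [])).2 =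
      (t.reverse.foldl pvStep (PySem.Dict.empty, [])).2 ++
        [List.replicate (t.count (pvRev x)) x] := by
  rw [List.reverse_cons, List.foldl_append]
  have h := pvStep_fst t.reverse PySem.Dict.empty []
  show (pvStep _ x).2 = _
  rw [show ∀ st s, (pvStep st s).2 = st.2 ++ [PySem.List.pyRepeat [s] (st.1.getD (pvRev s) 0)] from
    fun _ _ => rfl]
  rw [h, PySem.Dict.getD_foldl_insert_add_one, PySem.List.pyRepeat_singleton, List.count_reverse]
  simp

theorem b_eq_spec (l : List String) : check_reverse_alt l = pvSpec l := by
  show (((l.reverse.foldl pvStep (PySem.Dict.empty, [])).2).reverse).foldl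
      (fun out chunk => out ++ chunk) [] = pvSpec l
  induction l with
  | nil => rfl
  | cons x t ih =>
    rw [pvB2_cons]
    simp only [List.reverse_append, List.reverse_singleton, List.singleton_append,
      List.foldl_cons, List.nil_append]
    rw [show ∀ (cs : List (List String)) (init : List String),
          cs.foldl (fun out chunk => out ++ chunk) init = init ++ cs.flatten from
        fun cs => by induction cs with
          | nil => simp
          | cons a b ihc => intro init; simp [ihc, List.append_assoc]]
    rw [show ((t.reverse.foldl pvStep (PySem.Dict.empty, [])).2).reverse.flatten = pvSpec t from by
      rw [← ih]
      rw [show ∀ (cs : List (List String)) (init : List String),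
            cs.foldl (fun out chunk => out ++ chunk) init = init ++ cs.flatten from
          fun cs => by induction cs with
            | nil => simp
            | cons a b ihc => intro init; simp [ihc, List.append_assoc]]
      simp]
    rfl

-- ===== VERDICT (by name: the statement is the Claim_ definition above) =====
theorem check_reverse_spec : Claim_equal_check_reverse := by
  intro l _
  unfold Spec_check_reverse
  rw [a_eq_spec, b_eq_spec]
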